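-- pv_equiv track=rewrite | github.com/HudzaifahArrantisi/Cyber-Sentinel | src/utils.py | check_weak_password
-- ===== SOURCE A (Python) =====
-- from typing import Optional, Dict, List, Tuple, Any
--
-- def check_weak_password(password: str) -> List[str]:
--     """Check if password is weak"""
--     warnings = []
--
--     if len(password) < 8:
--         warnings.append("Password is too short (minimum 8 characters)")
--
--     if not any(c.isupper() for c in password):
--         warnings.append("Password should contain uppercase letters")
--
--     if not any(c.islower() for c in password):
--         warnings.append("Password should contain lowercase letters")
--
--     if not any(c.isdigit() for c in password):
--         warnings.append("Password should contain numbers")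
--
--     if not any(c in '!@#$%^&*()_+-=[]{}|;:,.<>?`~' for c in password):
--         warnings.append("Password should contain special characters")
--
--     # Common weak passwords
--     weak_passwords = [
--         'password', '123456', 'qwerty', 'admin', 'welcome',
--         'password123', 'letmein', 'monkey', 'sunshine', 'iloveyou'
--     ]
--
--     if password.lower() in weak_passwords:
--         warnings.append("Password is too common")
--
--     return warnings
-- ===== SOURCE B (Python) =====
-- def check_weak_password(password: str) -> list:
--     """Check if password is weak (single pass over the characters)."""
--     has_upper = has_lower = has_digit = has_special = False
--     specials = '!@#$%^&*()_+-=[]{}|;:,.<>?`~'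
--     for c in password:
--         has_upper = has_upper or c.isupper()
--         has_lower = has_lower or c.islower()
--         has_digit = has_digit or c.isdigit()
--         has_special = has_special or c in specials
--
--     warnings = []
--     if len(password) < 8:
--         warnings.append("Password is too short (minimum 8 characters)")
--     if not has_upper:
--         warnings.append("Password should contain uppercase letters")
--     if not has_lower:
--         warnings.append("Password should contain lowercase letters")
--     if not has_digit:
--         warnings.append("Password should contain numbers")
--     if not has_special:
--         warnings.append("Password should contain special characters")
--     if password.lower() in {
--         'password', '123456', 'qwerty', 'admin', 'welcome',
--         'password123', 'letmein', 'monkey', 'sunshine', 'iloveyou'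
--     }:
--         warnings.append("Password is too common")
--     return warnings
-- ===== Notes on version B (the rewrite author's own statement) =====
-- stated objective: faster
-- what changed: Replaces A's four separate any(...) scans over the password with a single pass that accumulates four has_upper/has_lower/has_digit/has_special flags, then emits the warnings from the flags (set membership for the common-password check).
import Mathlib
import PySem

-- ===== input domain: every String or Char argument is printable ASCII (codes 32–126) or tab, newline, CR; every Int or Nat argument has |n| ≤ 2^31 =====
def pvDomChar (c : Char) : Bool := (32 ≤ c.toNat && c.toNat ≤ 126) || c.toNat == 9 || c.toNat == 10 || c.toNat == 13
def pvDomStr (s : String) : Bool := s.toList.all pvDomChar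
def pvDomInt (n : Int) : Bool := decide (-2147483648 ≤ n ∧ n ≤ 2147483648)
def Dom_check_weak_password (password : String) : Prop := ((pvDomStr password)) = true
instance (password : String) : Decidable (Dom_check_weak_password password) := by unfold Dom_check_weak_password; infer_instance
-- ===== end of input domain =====

-- B replaces A's four separate any(...) scans with one pass accumulating four flags (alternative decomposition, same cost class).

-- ===== PORT A =====
def pvSpecials : List Char := "!@#$%^&*()_+-=[]{}|;:,.<>?`~".toList

def pvWeakPasswords : List String :=
  ["password", "123456", "qwerty", "admin", "welcome",
   "password123", "letmein", "monkey", "sunshine", "iloveyou"]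

def check_weak_password (password : String) : List String :=
  let warnings : List String := []
  let warnings := if PySem.Str.len password < 8 then warnings ++ ["Password is too short (minimum 8 characters)"] else warnings
  let warnings := if !(password.toList.any (fun c => PySem.Chars.isupper c)) then warnings ++ ["Password should contain uppercase letters"] else warnings
  let warnings := if !(password.toList.any (fun c => PySem.Chars.islower c)) then warnings ++ ["Password should contain lowercase letters"] else warnings
  let warnings := if !(password.toList.any (fun c => PySem.Chars.isdigit c)) then warnings ++ ["Password should contain numbers"] else warnings
  let warnings := if !(password.toList.any (fun c => pvSpecials.contains c)) then warnings ++ ["Password should contain special characters"] else warnings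
  let warnings := if pvWeakPasswords.contains (PySem.Str.lower password) then warnings ++ ["Password is too common"] else warnings
  warnings

-- ===== PORT B =====
def check_weak_password_alt (password : String) : List String :=
  let flags := password.toList.foldl
    (fun (s : Bool × Bool × Bool × Bool) c =>
      (s.1 || PySem.Chars.isupper c,
       s.2.1 || PySem.Chars.islower c,
       s.2.2.1 || PySem.Chars.isdigit c,
       s.2.2.2 || pvSpecials.contains c))
    (false, false, false, false)
  (if PySem.Str.len password < 8 then ["Password is too short (minimum 8 characters)"] else []) ++
  (if flags.1 then [] else ["Password should contain uppercase letters"]) ++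
  (if flags.2.1 then [] else ["Password should contain lowercase letters"]) ++
  (if flags.2.2.1 then [] else ["Password should contain numbers"]) ++
  (if flags.2.2.2 then [] else ["Password should contain special characters"]) ++
  (if (PySem.Set.ofList pvWeakPasswords).contains (PySem.Str.lower password) then ["Password is too common"] else [])

-- ===== PRECONDITION & SPEC =====
def Spec_check_weak_password (password : String) (out : List String) : Prop := out = check_weak_password_alt password
instance (password : String) (out : List String) : Decidable (Spec_check_weak_password password out) := by unfold Spec_check_weak_password; infer_instance

-- ===== CLAIM (what is proved, stated in full; the proofs are below) =====
def Claim_equal_check_weak_password : Prop := ∀ (password : String), Dom_check_weak_password password → Spec_check_weak_password password (check_weak_password password)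

-- ===== LEMMAS AND PROOFS =====

theorem pvFlags_eq (l : List Char) (a b c d : Bool) :
    l.foldl
      (fun (s : Bool × Bool × Bool × Bool) ch =>
        (s.1 || PySem.Chars.isupper ch,
         s.2.1 || PySem.Chars.islower ch,
         s.2.2.1 || PySem.Chars.isdigit ch,
         s.2.2.2 || pvSpecials.contains ch))
      (a, b, c, d)
    = (a || l.any (fun ch => PySem.Chars.isupper ch),
       b || l.any (fun ch => PySem.Chars.islower ch),
       c || l.any (fun ch => PySem.Chars.isdigit ch),
       d || l.any (fun ch => pvSpecials.contains ch)) := by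
  induction l generalizing a b c d with
  | nil => simp
  | cons x xs ih => rw [List.foldl_cons, ih]; simp [List.any_cons, Bool.or_assoc]

theorem pv_append_ite {p : Prop} [Decidable p] (w x : List String) :
    (if p then w ++ x else w) = w ++ (if p then x else []) := by
  split <;> simp

theorem pv_ite_not (c : Bool) (x y : List String) :
    (if (!c) = true then x else y) = if c = true then y else x := by
  cases c <;> simp

-- ===== VERDICT (by name: the statement is the Claim_ definition above) =====
theorem check_weak_password_spec : Claim_equal_check_weak_password := by
  intro password _
  unfold Spec_check_weak_password check_weak_password check_weak_password_alt
  have hset : (PySem.Set.ofList pvWeakPasswords).contains (PySem.Str.lower password)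
      = pvWeakPasswords.contains (PySem.Str.lower password) := by
    simp [PySem.Set.contains_eq_listContains, PySem.Set.mem_ofList]
  simp only [pvFlags_eq, Bool.false_or, hset, pv_append_ite, pv_ite_not,
    List.nil_append, List.append_assoc]
  split_ifs <;> simp_all
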